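-- pv_equiv track=rewrite | github.com/Hungtran-pro/GomokuGame | main1.py | evaluate_win_state
-- ===== SOURCE A (Python) =====
-- def get_list(board,cord_s,dx,dy,cord_d):
--     '''
--     Return a list including the value of each cell (' ' or 'p' or 'r')
--         x, y: the coordinates (x, y) of the start point of the list
--         xd, yd: the coordicates (x, y) of the destination point of the list
--         dx, dy: direction moves
--     '''
--     x, y = cord_s
--     xd,yd = cord_d
--     lst = []
--     while  x != xd + dx or y != yd + dy:
--         lst.append(board[x][y])
--         x += dx
--         y += dy
--     return lst
--
-- def score_of_list(lst, color):
--     '''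
--     Return value of the list corresponding to the color
--     '''
--     blank = lst.count(' ')
--     filled = lst.count(color)
--
--     if blank + filled < 5:
--         return -1
--     elif blank == 5:
--         return 0
--     else:
--         return filled
--
-- def score_of_full_list(board,cord_s,dx,dy,cord_d,color):
--     '''
--     Return a list containing marks corresponding to an 5-element list
--         cord_s: a tuple contains the coordinates (x, y) of the start point of the list
--         cord_d: a tuple contains the coordicates (x, y) of the destination point of the list
--         dx, dy: direction moves
--         color: indicate color of robot of person
--     '''
--     scores = []
--     row = get_list(board,cord_s,dx,dy,cord_d)
--     for start in range(len(row)-4):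
--         score = score_of_list(row[start:start+5],color)
--         scores.append(score)
--
--     return scores
--
-- def summarize_score(score_dir):
--     '''
--     Get the highest score of all directions
--     '''
--     score_max = -1
--     for key in score_dir:
--         score_max_tmp = -1
--         score_max_tmp = max(max(score_dir[key]),score_max_tmp)
--         score_max = max(score_max, score_max_tmp)
--     return score_max
--
-- def evaluate_win_state(board, move_history, color):
--     '''
--     Evaluate the current state of the board (WIN or KEEP PLAYING)
--     '''
--     score_dir = {(0,1):[],(-1,1):[],(1,0):[],(1,1):[]}
--     board_length = len(board)
--     for i in range(board_length):
--         score_dir[(0,1)].extend(score_of_full_list(board,(i, 0), 0, 1,(i,board_length-1), color))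
--         score_dir[(1,0)].extend(score_of_full_list(board,(0, i), 1, 0,(board_length-1,i), color))
--         score_dir[(1,1)].extend(score_of_full_list(board,(i, 0), 1,1,(board_length-1,board_length-1-i), color))
--         score_dir[(-1,1)].extend(score_of_full_list(board,(i,0), -1, 1,(0,i), color))
--
--         if i + 1 < len(board):
--             score_dir[(1,1)].extend(score_of_full_list(board,(0, i+1), 1, 1,(board_length-2-i,board_length-1), color))
--             score_dir[(-1,1)].extend(score_of_full_list(board,(board_length -1 , i + 1), -1,1,(i+1,board_length-1), color))
--
--     return summarize_score(score_dir)
-- ===== SOURCE B (Python) =====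
-- def _window_score(board, color, x, y, dx, dy):
--     cells = [board[x + k * dx][y + k * dy] for k in range(5)]
--     blank = cells.count(' ')
--     filled = cells.count(color)
--     if blank + filled < 5:
--         return -1
--     elif blank == 5:
--         return 0
--     else:
--         return filled
--
-- def evaluate_win_state(board, move_history, color):
--     '''Direct scan: the max over the scores of every in-bounds 5-window at each cell and direction.'''
--     n = len(board)
--     scores = [_window_score(board, color, x, y, dx, dy)
--               for x in range(n)
--               for y in range(n)
--               for dx, dy in ((0, 1), (1, 0), (1, 1), (-1, 1))
--               if 0 <= x + 4 * dx < n and 0 <= y + 4 * dy < n]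
--     return max(scores)
-- ===== Notes on version B (the rewrite author's own statement) =====
-- stated objective: simpler
-- what changed: Replaces the get_list while-loop line extraction, slicing pipeline, per-direction dict of score lists and summarize pass with one direct nested scan that enumerates every in-bounds 5-window at each cell and direction and takes the max of their scores.
import Mathlib
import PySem

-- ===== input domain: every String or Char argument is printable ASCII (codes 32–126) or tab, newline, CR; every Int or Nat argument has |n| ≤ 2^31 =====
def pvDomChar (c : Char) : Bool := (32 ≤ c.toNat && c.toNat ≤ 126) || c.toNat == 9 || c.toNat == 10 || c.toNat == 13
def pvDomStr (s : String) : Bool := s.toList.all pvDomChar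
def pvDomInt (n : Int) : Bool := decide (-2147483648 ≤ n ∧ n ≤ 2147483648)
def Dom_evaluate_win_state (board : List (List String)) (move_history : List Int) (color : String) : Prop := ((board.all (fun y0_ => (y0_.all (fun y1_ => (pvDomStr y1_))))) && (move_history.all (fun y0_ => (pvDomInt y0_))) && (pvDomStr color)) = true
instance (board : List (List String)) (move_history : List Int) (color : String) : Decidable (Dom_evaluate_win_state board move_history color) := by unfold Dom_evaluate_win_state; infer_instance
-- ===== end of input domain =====

-- B replaces A's line-extraction/slicing/dict pipeline with a direct scan scoring every
-- in-bounds 5-window at each cell and direction (objective: simpler; same asymptotic cost).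

-- ===== PORT A =====
-- total stand-in for board[x][y]; exact wherever both indices are in range (guaranteed under Pre_)
def pvCell (board : List (List String)) (x y : Int) : String :=
  (PySem.List.pyGet? ((PySem.List.pyGet? board x).getD []) y).getD ""

-- the while-loop of get_list, fuel-recursive (fuel only makes the loop total; on every call
-- the loop runs at most board.length times, below the fuel board.length+1 supplied by get_list)
def getListAux (board : List (List String)) (dx dy xd yd : Int) : Nat → Int → Int → List String
  | 0, _, _ => []
  | f + 1, x, y =>
    if x ≠ xd + dx ∨ y ≠ yd + dy then
      pvCell board x y :: getListAux board dx dy xd yd f (x + dx) (y + dy)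
    else []

def get_list (board : List (List String)) (cord_s : Int × Int) (dx dy : Int) (cord_d : Int × Int) : List String :=
  getListAux board dx dy cord_d.1 cord_d.2 (board.length + 1) cord_s.1 cord_s.2

def score_of_list (lst : List String) (color : String) : Int :=
  let blank := lst.count " "
  let filled := lst.count color
  if blank + filled < 5 then -1
  else if blank = 5 then 0
  else (filled : Int)

def score_of_full_list (board : List (List String)) (cord_s : Int × Int) (dx dy : Int) (cord_d : Int × Int) (color : String) : List Int :=
  let row := get_list board cord_s dx dy cord_d
  (PySem.List.pyRange 0 ((row.length : Int) - 4) 1).map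
    (fun start => score_of_list (PySem.List.slice row (some start) (some (start + 5))) color)

-- max(max(l), -1): Python's max(l) raises on an empty list; the .getD (-1) is reached only
-- outside Pre_ (where the Python raises)
def pvMaxTmp (l : List Int) : Int := max ((PySem.List.max? l (fun v => v)).getD (-1)) (-1)

-- summarize_score: the dict has the four fixed keys (0,1),(-1,1),(1,0),(1,1) in insertion
-- order; it is represented as four lists, iterated in that key order
def summarize_score (l01 lm11 l10 l11 : List Int) : Int :=
  [l01, lm11, l10, l11].foldl (fun score_max l => max score_max (pvMaxTmp l)) (-1)

-- the body of A's main loop (state = the dict's four lists, key order (0,1),(-1,1),(1,0),(1,1))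
def pvStepA (board : List (List String)) (color : String) (bl : Int)
    (st : List Int × List Int × List Int × List Int) (i : Int) :
    List Int × List Int × List Int × List Int :=
  let l01 := st.1 ++ score_of_full_list board (i, 0) 0 1 (i, bl - 1) color
  let l10 := st.2.2.1 ++ score_of_full_list board (0, i) 1 0 (bl - 1, i) color
  let l11 := st.2.2.2 ++ score_of_full_list board (i, 0) 1 1 (bl - 1, bl - 1 - i) color
  let lm11 := st.2.1 ++ score_of_full_list board (i, 0) (-1) 1 (0, i) color
  if i + 1 < bl then
    (l01, lm11 ++ score_of_full_list board (bl - 1, i + 1) (-1) 1 (i + 1, bl - 1) color,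
     l10, l11 ++ score_of_full_list board (0, i + 1) 1 1 (bl - 2 - i, bl - 1) color)
  else (l01, lm11, l10, l11)

def evaluate_win_state (board : List (List String)) (move_history : List Int) (color : String) : Int :=
  let board_length : Int := board.length
  let st := (PySem.List.pyRange 0 board_length 1).foldl (pvStepA board color board_length)
    (([], [], [], []) : List Int × List Int × List Int × List Int)
  summarize_score st.1 st.2.1 st.2.2.1 st.2.2.2

-- ===== PORT B =====
def window_score (board : List (List String)) (color : String) (x y dx dy : Int) : Int :=
  let cells := (PySem.List.pyRange 0 5 1).map (fun k => pvCell board (x + k * dx) (y + k * dy))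
  let blank := cells.count " "
  let filled := cells.count color
  if blank + filled < 5 then -1
  else if blank = 5 then 0
  else (filled : Int)

-- max(scores): Python raises ValueError on an empty list; the .getD (-1) is reached only
-- outside Pre_ (where the Python raises)
def evaluate_win_state_alt (board : List (List String)) (move_history : List Int) (color : String) : Int :=
  let n : Int := board.length
  let scores := (PySem.List.pyRange 0 n 1).flatMap (fun x =>
    (PySem.List.pyRange 0 n 1).flatMap (fun y =>
      (([((0 : Int), (1 : Int)), (1, 0), (1, 1), (-1, 1)]).filter
        (fun d => decide (0 ≤ x + 4 * d.1 ∧ x + 4 * d.1 < n ∧ 0 ≤ y + 4 * d.2 ∧ y + 4 * d.2 < n))).map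
        (fun d => window_score board color x y d.1 d.2)))
  (PySem.List.max? scores (fun v => v)).getD (-1)

-- ===== PRECONDITION & SPEC =====
-- Pre_ excludes exactly the inputs on which the Python A raises: boards with fewer than
-- 5 rows (ValueError: max() of an empty score list) and boards with a row shorter than
-- the number of rows (IndexError while reading a line)
def Pre_evaluate_win_state (board : List (List String)) (move_history : List Int) (color : String) : Prop :=
  5 ≤ board.length ∧ ∀ row ∈ board, board.length ≤ row.length
instance (board : List (List String)) (move_history : List Int) (color : String) : Decidable (Pre_evaluate_win_state board move_history color) := by unfold Pre_evaluate_win_state; infer_instance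

def pvWitness_evaluate_win_state : List (List String) × List Int × String :=
  ([[" ", " ", " ", " ", " "], [" ", "p", " ", " ", " "], [" ", " ", "p", " ", " "],
    [" ", " ", " ", "p", " "], [" ", " ", " ", " ", "r"]], ([] : List Int), "p")

def Spec_evaluate_win_state (board : List (List String)) (move_history : List Int) (color : String) (out : Int) : Prop := out = evaluate_win_state_alt board move_history color
instance (board : List (List String)) (move_history : List Int) (color : String) (out : Int) : Decidable (Spec_evaluate_win_state board move_history color out) := by unfold Spec_evaluate_win_state; infer_instance

-- ===== CLAIM (what is proved, stated in full; the proofs are below) =====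
def Claim_equal_evaluate_win_state : Prop := ∀ (board : List (List String)) (move_history : List Int) (color : String), Dom_evaluate_win_state board move_history color → Pre_evaluate_win_state board move_history color → Spec_evaluate_win_state board move_history color (evaluate_win_state board move_history color)

-- ===== LEMMAS AND PROOFS =====

-- a 5-window is in bounds of the n×n board
def pvInB (n x y dx dy : Int) : Prop :=
  0 ≤ x ∧ x < n ∧ 0 ≤ y ∧ y < n ∧ 0 ≤ x + 4 * dx ∧ x + 4 * dx < n ∧ 0 ≤ y + 4 * dy ∧ y + 4 * dy < n

-- the loop of get_list runs exactly m iterations when the destination lies m steps ahead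
theorem getListAux_eq (board : List (List String)) (dx dy : Int) (m : Nat) :
    ∀ (f : Nat) (x y xd yd : Int), m < f → xd + dx = x + (m : Int) * dx → yd + dy = y + (m : Int) * dy →
    (dx ≠ 0 ∨ dy ≠ 0) →
    getListAux board dx dy xd yd f x y
      = (List.range m).map (fun k : Nat => pvCell board (x + (k : Int) * dx) (y + (k : Int) * dy)) := by
  induction m with
  | zero =>
    intro f x y xd yd hf hx hy hne
    match f, hf with
    | f + 1, _ =>
      simp only [Nat.cast_zero, zero_mul, add_zero] at hx hy
      simp only [getListAux]
      rw [if_neg (by omega)]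
      simp
  | succ m ih =>
    intro f x y xd yd hf hx hy hne
    match f, hf with
    | f + 1, hf =>
      push_cast at hx hy
      simp only [getListAux]
      rw [if_pos ?hc]
      case hc =>
        rcases hne with h | h
        · left; intro hc
          have h2 : ((m : Int) + 1) * dx = 0 := by omega
          exact (mul_ne_zero (by positivity) h) h2
        · right; intro hc
          have h2 : ((m : Int) + 1) * dy = 0 := by omega
          exact (mul_ne_zero (by positivity) h) h2
      rw [ih f (x + dx) (y + dy) xd yd (by omega) (by rw [hx]; ring)
        (by rw [hy]; ring) hne]
      rw [List.range_succ_eq_map]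
      simp only [List.map_cons, List.map_map]
      congr 1
      · norm_num
      · apply List.map_congr_left
        intro k _
        simp only [Function.comp_apply]
        push_cast
        congr 1 <;> ring


-- xs[t:t+5] of a line of m cells is the 5-cell window at offset t
theorem windowSlice {α : Type} (g : Nat → α) (m t : Nat) (h : t + 5 ≤ m) :
    PySem.List.slice ((List.range m).map g) (some (t : Int)) (some ((t : Int) + 5))
      = (List.range 5).map (fun k => g (t + k)) := by
  rw [show ((t:Int) + 5) = ((t:Int) + ((5:Nat):Int)) by norm_num, PySem.List.slice_natCast_add]
  have htd : List.take 5 (List.drop t (List.range m)) = (List.range 5).map (fun k => t + k) := by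
    apply List.ext_getElem
    · simp; omega
    · intro i h1 h2
      simp [List.getElem_take, List.getElem_drop, List.getElem_range]
  rw [← List.map_drop, ← List.map_take, htd, List.map_map]
  rfl

theorem window_score_eq (board : List (List String)) (color : String) (x0 y0 dx dy : Int) (j : Nat) :
    score_of_list ((List.range 5).map (fun k => pvCell board (x0 + ((j + k : Nat) : Int) * dx) (y0 + ((j + k : Nat) : Int) * dy))) color
      = window_score board color (x0 + (j : Int) * dx) (y0 + (j : Int) * dy) dx dy := by
  simp only [score_of_list, window_score]
  have hc : (List.range 5).map (fun k => pvCell board (x0 + ((j + k : Nat) : Int) * dx) (y0 + ((j + k : Nat) : Int) * dy))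
      = (PySem.List.pyRange 0 5 1).map (fun k => pvCell board (x0 + (j : Int) * dx + k * dx) (y0 + (j : Int) * dy + k * dy)) := by
    rw [show (5 : Int) = ((5 : Nat) : Int) by norm_num, PySem.List.pyRange_zero_nat, List.map_map]
    apply List.map_congr_left
    intro k _
    simp only [Function.comp_apply]
    congr 1 <;> push_cast <;> ring
  rw [hc]

-- score_of_full_list is the map of window scores along the line
theorem sofl_eq (board : List (List String)) (x0 y0 dx dy : Int) (cord_d : Int × Int) (color : String) (m : Nat)
    (h : get_list board (x0, y0) dx dy cord_d
      = (List.range m).map (fun k : Nat => pvCell board (x0 + (k : Int) * dx) (y0 + (k : Int) * dy))) :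
    score_of_full_list board (x0, y0) dx dy cord_d color
      = (PySem.List.pyRange 0 ((m : Int) - 4) 1).map
          (fun t => window_score board color (x0 + t * dx) (y0 + t * dy) dx dy) := by
  simp only [score_of_full_list, h, List.length_map, List.length_range]
  apply List.map_congr_left
  intro t ht
  rw [PySem.List.mem_pyRange_one] at ht
  obtain ⟨ht0, ht1⟩ := ht
  have hj : ((t.toNat : Nat) : Int) = t := Int.toNat_of_nonneg ht0
  rw [← hj, windowSlice _ m t.toNat (by omega)]
  exact window_score_eq board color x0 y0 dx dy t.toNat

-- the per-direction lists accumulated by A's loop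
def pvF01 (board : List (List String)) (color : String) (bl i : Int) : List Int :=
  score_of_full_list board (i, 0) 0 1 (i, bl - 1) color
def pvF10 (board : List (List String)) (color : String) (bl i : Int) : List Int :=
  score_of_full_list board (0, i) 1 0 (bl - 1, i) color
def pvF11 (board : List (List String)) (color : String) (bl i : Int) : List Int :=
  score_of_full_list board (i, 0) 1 1 (bl - 1, bl - 1 - i) color
    ++ (if i + 1 < bl then score_of_full_list board (0, i + 1) 1 1 (bl - 2 - i, bl - 1) color else [])
def pvFm11 (board : List (List String)) (color : String) (bl i : Int) : List Int :=
  score_of_full_list board (i, 0) (-1) 1 (0, i) color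
    ++ (if i + 1 < bl then score_of_full_list board (bl - 1, i + 1) (-1) 1 (i + 1, bl - 1) color else [])

theorem foldA (board : List (List String)) (color : String) (bl : Int) (l : List Int)
    (a b c d : List Int) :
    l.foldl (pvStepA board color bl) (a, b, c, d)
      = (a ++ l.flatMap (pvF01 board color bl), b ++ l.flatMap (pvFm11 board color bl),
         c ++ l.flatMap (pvF10 board color bl), d ++ l.flatMap (pvF11 board color bl)) := by
  induction l generalizing a b c d with
  | nil => simp
  | cons i t ih =>
    rw [List.foldl_cons, show pvStepA board color bl (a, b, c, d) i
        = (a ++ pvF01 board color bl i, b ++ pvFm11 board color bl i,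
           c ++ pvF10 board color bl i, d ++ pvF11 board color bl i) from by
      simp only [pvStepA, pvF01, pvFm11, pvF10, pvF11]
      split_ifs with h <;> simp, ih]
    simp [List.flatMap_cons, List.append_assoc]

-- max machinery
theorem foldl_max_le (l : List Int) (i c : Int) (hi : i ≤ c) (h : ∀ s ∈ l, s ≤ c) :
    l.foldl max i ≤ c := by
  induction l generalizing i with
  | nil => exact hi
  | cons hd tl ih =>
    exact ih _ (by have := h hd (by simp); omega) (fun s hs => h s (by simp [hs]))

theorem pvMaxTmp_fold (l : List Int) (m : Int) (hm : -1 ≤ m) :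
    max m (pvMaxTmp l) = l.foldl max m := by
  unfold pvMaxTmp
  cases hmax : PySem.List.max? l (fun v => v) with
  | none =>
    have : l = [] := (PySem.List.max?_eq_none_iff l (fun v => v)).mp hmax
    subst this; simp; omega
  | some v =>
    have hv : v ∈ l := PySem.List.max?_mem hmax
    have hmax2 := PySem.List.max?_isMax hmax
    have hfold : l.foldl max m = max m v := by
      apply le_antisymm
      · exact foldl_max_le l m (max m v) (le_max_left _ _)
          (fun s hs => le_trans (hmax2 s hs) (le_max_right _ _))
      · have h1 := (PySem.List.le_foldl_max l m).1
        have h2 := (PySem.List.le_foldl_max l m).2 v hv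
        omega
    rw [hfold]; simp; omega

theorem summarize_eq (a b c d : List Int) :
    summarize_score a b c d = (a ++ b ++ c ++ d).foldl max (-1) := by
  simp only [summarize_score, List.foldl_cons, List.foldl_nil]
  rw [pvMaxTmp_fold a (-1) le_rfl]
  have h1 : (-1 : Int) ≤ a.foldl max (-1) := (PySem.List.le_foldl_max a (-1)).1
  rw [pvMaxTmp_fold b _ h1]
  have h2 : (-1 : Int) ≤ b.foldl max (a.foldl max (-1)) := le_trans h1 (PySem.List.le_foldl_max b _).1
  rw [pvMaxTmp_fold c _ h2]
  have h3 : (-1 : Int) ≤ c.foldl max (b.foldl max (a.foldl max (-1))) :=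
    le_trans h2 (PySem.List.le_foldl_max c _).1
  rw [pvMaxTmp_fold d _ h3]
  simp [List.foldl_append]

theorem foldl_max_eq_of_mem_iff (l1 l2 : List Int) (i : Int) (h : ∀ s, s ∈ l1 ↔ s ∈ l2) :
    l1.foldl max i = l2.foldl max i := by
  apply le_antisymm
  · exact foldl_max_le _ _ _ ((PySem.List.le_foldl_max l2 i).1)
      (fun s hs => (PySem.List.le_foldl_max l2 i).2 s ((h s).mp hs))
  · exact foldl_max_le _ _ _ ((PySem.List.le_foldl_max l1 i).1)
      (fun s hs => (PySem.List.le_foldl_max l1 i).2 s ((h s).mpr hs))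

theorem window_score_ge_neg_one (board : List (List String)) (color : String) (x y dx dy : Int) :
    (-1 : Int) ≤ window_score board color x y dx dy := by
  simp only [window_score]
  split_ifs <;> omega

-- B as a fold of max over a flat list of window scores
def pvLB (board : List (List String)) (color : String) (n : Int) : List Int :=
  (PySem.List.pyRange 0 n 1).flatMap (fun x =>
    (PySem.List.pyRange 0 n 1).flatMap (fun y =>
      (([((0 : Int), (1 : Int)), (1, 0), (1, 1), (-1, 1)]).filter
        (fun d => decide (0 ≤ x + 4 * d.1 ∧ x + 4 * d.1 < n ∧ 0 ≤ y + 4 * d.2 ∧ y + 4 * d.2 < n))).map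
        (fun d => window_score board color x y d.1 d.2)))

theorem B_eq (board : List (List String)) (move_history : List Int) (color : String) :
    evaluate_win_state_alt board move_history color
      = (pvLB board color (board.length : Int)).foldl max (-1) := by
  simp only [evaluate_win_state_alt, pvLB]
  set L := (PySem.List.pyRange 0 (board.length : Int) 1).flatMap (fun x =>
    (PySem.List.pyRange 0 (board.length : Int) 1).flatMap (fun y =>
      (([((0 : Int), (1 : Int)), (1, 0), (1, 1), (-1, 1)]).filter
        (fun d => decide (0 ≤ x + 4 * d.1 ∧ x + 4 * d.1 < (board.length : Int) ∧
          0 ≤ y + 4 * d.2 ∧ y + 4 * d.2 < (board.length : Int)))).map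
        (fun d => window_score board color x y d.1 d.2))) with hL
  have hge : ∀ s ∈ L, (-1 : Int) ≤ s := by
    intro s hs
    rw [hL] at hs
    simp only [List.mem_flatMap, List.mem_map] at hs
    obtain ⟨x, -, y, -, d, -, rfl⟩ := hs
    exact window_score_ge_neg_one board color x y d.1 d.2
  have hfold := pvMaxTmp_fold L (-1) le_rfl
  unfold pvMaxTmp at hfold
  cases hm : PySem.List.max? L (fun v => v) with
  | none =>
    have : L = [] := (PySem.List.max?_eq_none_iff L (fun v => v)).mp hm
    rw [this]
    simp
  | some v =>
    have hv : (-1 : Int) ≤ v := hge v (PySem.List.max?_mem hm)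
    rw [hm] at hfold
    simp only [Option.getD_some] at hfold ⊢
    omega

theorem mem_pvLB (board : List (List String)) (color : String) (n : Int) (s : Int) :
    s ∈ pvLB board color n ↔ ∃ x y dx dy : Int,
      ((dx, dy) = ((0 : Int), (1 : Int)) ∨ (dx, dy) = ((1 : Int), (0 : Int)) ∨ (dx, dy) = ((1 : Int), (1 : Int)) ∨ (dx, dy) = ((-1 : Int), (1 : Int)))
      ∧ pvInB n x y dx dy ∧ s = window_score board color x y dx dy := by
  unfold pvLB
  simp only [List.mem_flatMap, List.mem_map, List.mem_filter, PySem.List.mem_pyRange_one,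
    List.mem_cons, List.not_mem_nil, or_false]
  constructor
  · rintro ⟨x, hx, y, hy, d, ⟨hd, hguard⟩, rfl⟩
    rw [decide_eq_true_eq] at hguard
    refine ⟨x, y, d.1, d.2, ?_, ?_, rfl⟩
    · rcases hd with h | h | h | h <;> subst h <;> simp
    · unfold pvInB
      exact ⟨hx.1, hx.2, hy.1, hy.2, hguard.1, hguard.2.1, hguard.2.2.1, hguard.2.2.2⟩
  · rintro ⟨x, y, dx, dy, hd, hInB, rfl⟩
    unfold pvInB at hInB
    refine ⟨x, ⟨hInB.1, hInB.2.1⟩, y, ⟨hInB.2.2.1, hInB.2.2.2.1⟩, (dx, dy), ⟨?_, ?_⟩, rfl⟩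
    · rcases hd with h | h | h | h <;> simp [Prod.ext_iff] at h <;> simp [h.1, h.2]
    · rw [decide_eq_true_eq]
      exact ⟨hInB.2.2.2.2.1, hInB.2.2.2.2.2.1, hInB.2.2.2.2.2.2.1, hInB.2.2.2.2.2.2.2⟩


theorem mem_append_if (s : Int) (A B : List Int) (c : Prop) [Decidable c] :
    s ∈ A ++ (if c then B else []) ↔ s ∈ A ∨ (c ∧ s ∈ B) := by
  split_ifs with h <;> simp [h]

theorem mem_L01 (board : List (List String)) (color : String) (s : Int) :
    s ∈ (PySem.List.pyRange 0 (board.length : Int) 1).flatMap (pvF01 board color (board.length : Int))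
      ↔ ∃ x y : Int, pvInB (board.length : Int) x y 0 1 ∧ s = window_score board color x y 0 1 := by
  have hrow : ∀ i : Int, get_list board (i, 0) 0 1 (i, (board.length : Int) - 1)
      = (List.range board.length).map (fun k : Nat => pvCell board (i + (k : Int) * 0) (0 + (k : Int) * 1)) := by
    intro i
    exact getListAux_eq board 0 1 board.length (board.length + 1) i 0 i ((board.length : Int) - 1)
      (by omega) (by simp) (by ring) (Or.inr one_ne_zero)
  have hF : ∀ i : Int, pvF01 board color (board.length : Int) i
      = (PySem.List.pyRange 0 ((board.length : Int) - 4) 1).map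
          (fun t => window_score board color (i + t * 0) (0 + t * 1) 0 1) := by
    intro i
    exact sofl_eq board i 0 0 1 _ color board.length (hrow i)
  constructor
  · intro hs
    rw [List.mem_flatMap] at hs
    obtain ⟨i, hi, hs⟩ := hs
    rw [PySem.List.mem_pyRange_one] at hi
    rw [hF i, List.mem_map] at hs
    obtain ⟨t, ht, rfl⟩ := hs
    rw [PySem.List.mem_pyRange_one] at ht
    refine ⟨i + t * 0, 0 + t * 1, ?_, rfl⟩
    unfold pvInB
    omega
  · rintro ⟨x, y, hI, rfl⟩
    unfold pvInB at hI
    rw [List.mem_flatMap]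
    refine ⟨x, by rw [PySem.List.mem_pyRange_one]; omega, ?_⟩
    rw [hF x, List.mem_map]
    refine ⟨y, by rw [PySem.List.mem_pyRange_one]; omega, ?_⟩
    rw [show x + y * 0 = x from by ring, show (0 : Int) + y * 1 = y from by ring]

theorem mem_L10 (board : List (List String)) (color : String) (s : Int) :
    s ∈ (PySem.List.pyRange 0 (board.length : Int) 1).flatMap (pvF10 board color (board.length : Int))
      ↔ ∃ x y : Int, pvInB (board.length : Int) x y 1 0 ∧ s = window_score board color x y 1 0 := by
  have hF : ∀ i : Int, pvF10 board color (board.length : Int) i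
      = (PySem.List.pyRange 0 ((board.length : Int) - 4) 1).map
          (fun t => window_score board color (0 + t * 1) (i + t * 0) 1 0) := by
    intro i
    exact sofl_eq board 0 i 1 0 _ color board.length
      (getListAux_eq board 1 0 board.length (board.length + 1) 0 i ((board.length : Int) - 1) i
        (by omega) (by ring) (by simp) (Or.inl one_ne_zero))
  constructor
  · intro hs
    rw [List.mem_flatMap] at hs
    obtain ⟨i, hi, hs⟩ := hs
    rw [PySem.List.mem_pyRange_one] at hi
    rw [hF i, List.mem_map] at hs
    obtain ⟨t, ht, rfl⟩ := hs
    rw [PySem.List.mem_pyRange_one] at ht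
    refine ⟨0 + t * 1, i + t * 0, ?_, rfl⟩
    unfold pvInB
    omega
  · rintro ⟨x, y, hI, rfl⟩
    unfold pvInB at hI
    rw [List.mem_flatMap]
    refine ⟨y, by rw [PySem.List.mem_pyRange_one]; omega, ?_⟩
    rw [hF y, List.mem_map]
    refine ⟨x, by rw [PySem.List.mem_pyRange_one]; omega, ?_⟩
    rw [show (0 : Int) + x * 1 = x from by ring, show y + x * 0 = y from by ring]

theorem mem_L11 (board : List (List String)) (color : String) (s : Int) :
    s ∈ (PySem.List.pyRange 0 (board.length : Int) 1).flatMap (pvF11 board color (board.length : Int))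
      ↔ ∃ x y : Int, pvInB (board.length : Int) x y 1 1 ∧ s = window_score board color x y 1 1 := by
  have hF1 : ∀ i : Int, 0 ≤ i → i < (board.length : Int) →
      score_of_full_list board (i, 0) 1 1 ((board.length : Int) - 1, (board.length : Int) - 1 - i) color
      = (PySem.List.pyRange 0 (((board.length - i.toNat : Nat) : Int) - 4) 1).map
          (fun t => window_score board color (i + t * 1) (0 + t * 1) 1 1) := by
    intro i h0 h1
    exact sofl_eq board i 0 1 1 _ color (board.length - i.toNat)
      (getListAux_eq board 1 1 (board.length - i.toNat) (board.length + 1) i 0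
        ((board.length : Int) - 1) ((board.length : Int) - 1 - i)
        (by omega) (by rw [mul_one]; omega) (by rw [mul_one]; omega) (Or.inl one_ne_zero))
  have hF2 : ∀ i : Int, 0 ≤ i → i + 1 < (board.length : Int) →
      score_of_full_list board (0, i + 1) 1 1 ((board.length : Int) - 2 - i, (board.length : Int) - 1) color
      = (PySem.List.pyRange 0 (((board.length - 1 - i.toNat : Nat) : Int) - 4) 1).map
          (fun t => window_score board color (0 + t * 1) ((i + 1) + t * 1) 1 1) := by
    intro i h0 h1
    exact sofl_eq board 0 (i + 1) 1 1 _ color (board.length - 1 - i.toNat)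
      (getListAux_eq board 1 1 (board.length - 1 - i.toNat) (board.length + 1) 0 (i + 1)
        ((board.length : Int) - 2 - i) ((board.length : Int) - 1)
        (by omega) (by rw [mul_one]; omega) (by rw [mul_one]; omega) (Or.inl one_ne_zero))
  constructor
  · intro hs
    rw [List.mem_flatMap] at hs
    obtain ⟨i, hi, hs⟩ := hs
    rw [PySem.List.mem_pyRange_one] at hi
    rw [pvF11, mem_append_if] at hs
    rcases hs with hs | ⟨hc, hs⟩
    · rw [hF1 i hi.1 hi.2, List.mem_map] at hs
      obtain ⟨t, ht, rfl⟩ := hs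
      rw [PySem.List.mem_pyRange_one] at ht
      refine ⟨i + t * 1, 0 + t * 1, ?_, rfl⟩
      unfold pvInB
      omega
    · rw [hF2 i hi.1 hc, List.mem_map] at hs
      obtain ⟨t, ht, rfl⟩ := hs
      rw [PySem.List.mem_pyRange_one] at ht
      refine ⟨0 + t * 1, (i + 1) + t * 1, ?_, rfl⟩
      unfold pvInB
      omega
  · rintro ⟨x, y, hI, rfl⟩
    unfold pvInB at hI
    rw [List.mem_flatMap]
    by_cases hxy : y ≤ x
    · refine ⟨x - y, by rw [PySem.List.mem_pyRange_one]; omega, ?_⟩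
      rw [pvF11, mem_append_if]
      left
      rw [hF1 (x - y) (by omega) (by omega), List.mem_map]
      refine ⟨y, by rw [PySem.List.mem_pyRange_one]; omega, ?_⟩
      rw [show x - y + y * 1 = x from by ring, show (0 : Int) + y * 1 = y from by ring]
    · refine ⟨y - x - 1, by rw [PySem.List.mem_pyRange_one]; omega, ?_⟩
      rw [pvF11, mem_append_if]
      right
      refine ⟨by omega, ?_⟩
      rw [hF2 (y - x - 1) (by omega) (by omega), List.mem_map]
      refine ⟨x, by rw [PySem.List.mem_pyRange_one]; omega, ?_⟩
      rw [show (0 : Int) + x * 1 = x from by ring, show y - x - 1 + 1 + x * 1 = y from by ring]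

theorem mem_Lm11 (board : List (List String)) (color : String) (s : Int) :
    s ∈ (PySem.List.pyRange 0 (board.length : Int) 1).flatMap (pvFm11 board color (board.length : Int))
      ↔ ∃ x y : Int, pvInB (board.length : Int) x y (-1) 1 ∧ s = window_score board color x y (-1) 1 := by
  have hF1 : ∀ i : Int, 0 ≤ i → i < (board.length : Int) →
      score_of_full_list board (i, 0) (-1) 1 (0, i) color
      = (PySem.List.pyRange 0 (((i.toNat + 1 : Nat) : Int) - 4) 1).map
          (fun t => window_score board color (i + t * (-1)) (0 + t * 1) (-1) 1) := by
    intro i h0 h1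
    exact sofl_eq board i 0 (-1) 1 _ color (i.toNat + 1)
      (getListAux_eq board (-1) 1 (i.toNat + 1) (board.length + 1) i 0 0 i
        (by omega) (by omega) (by rw [mul_one]; omega) (Or.inl (by norm_num)))
  have hF2 : ∀ i : Int, 0 ≤ i → i + 1 < (board.length : Int) →
      score_of_full_list board ((board.length : Int) - 1, i + 1) (-1) 1 (i + 1, (board.length : Int) - 1) color
      = (PySem.List.pyRange 0 (((board.length - 1 - i.toNat : Nat) : Int) - 4) 1).map
          (fun t => window_score board color ((board.length : Int) - 1 + t * (-1)) ((i + 1) + t * 1) (-1) 1) := by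
    intro i h0 h1
    exact sofl_eq board ((board.length : Int) - 1) (i + 1) (-1) 1 _ color (board.length - 1 - i.toNat)
      (getListAux_eq board (-1) 1 (board.length - 1 - i.toNat) (board.length + 1)
        ((board.length : Int) - 1) (i + 1) (i + 1) ((board.length : Int) - 1)
        (by omega) (by omega) (by rw [mul_one]; omega) (Or.inl (by norm_num)))
  constructor
  · intro hs
    rw [List.mem_flatMap] at hs
    obtain ⟨i, hi, hs⟩ := hs
    rw [PySem.List.mem_pyRange_one] at hi
    rw [pvFm11, mem_append_if] at hs
    rcases hs with hs | ⟨hc, hs⟩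
    · rw [hF1 i hi.1 hi.2, List.mem_map] at hs
      obtain ⟨t, ht, rfl⟩ := hs
      rw [PySem.List.mem_pyRange_one] at ht
      refine ⟨i + t * (-1), 0 + t * 1, ?_, rfl⟩
      unfold pvInB
      omega
    · rw [hF2 i hi.1 hc, List.mem_map] at hs
      obtain ⟨t, ht, rfl⟩ := hs
      rw [PySem.List.mem_pyRange_one] at ht
      refine ⟨(board.length : Int) - 1 + t * (-1), (i + 1) + t * 1, ?_, rfl⟩
      unfold pvInB
      omega
  · rintro ⟨x, y, hI, rfl⟩
    unfold pvInB at hI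
    rw [List.mem_flatMap]
    by_cases hxy : x + y ≤ (board.length : Int) - 1
    · refine ⟨x + y, by rw [PySem.List.mem_pyRange_one]; omega, ?_⟩
      rw [pvFm11, mem_append_if]
      left
      rw [hF1 (x + y) (by omega) (by omega), List.mem_map]
      refine ⟨y, by rw [PySem.List.mem_pyRange_one]; omega, ?_⟩
      rw [show x + y + y * (-1) = x from by ring, show (0 : Int) + y * 1 = y from by ring]
    · refine ⟨x + y - (board.length : Int), by rw [PySem.List.mem_pyRange_one]; omega, ?_⟩
      rw [pvFm11, mem_append_if]
      right
      refine ⟨by omega, ?_⟩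
      rw [hF2 (x + y - (board.length : Int)) (by omega) (by omega), List.mem_map]
      refine ⟨(board.length : Int) - 1 - x, by rw [PySem.List.mem_pyRange_one]; omega, ?_⟩
      rw [show (board.length : Int) - 1 + ((board.length : Int) - 1 - x) * (-1) = x from by ring,
        show x + y - (board.length : Int) + 1 + ((board.length : Int) - 1 - x) * 1 = y from by ring]

-- ===== VERDICT (by name: the statement is the Claim_ definition above) =====
theorem evaluate_win_state_spec : Claim_equal_evaluate_win_state := by
  intro board mh color hDom hPre
  unfold Spec_evaluate_win_state
  simp only [evaluate_win_state]
  rw [foldA]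
  simp only [List.nil_append]
  rw [summarize_eq, B_eq board mh color]
  apply foldl_max_eq_of_mem_iff
  intro s
  rw [mem_pvLB]
  simp only [List.mem_append]
  rw [mem_L01 board color s, mem_Lm11 board color s, mem_L10 board color s, mem_L11 board color s]
  constructor
  · rintro (((h | h) | h) | h) <;> obtain ⟨x, y, hI, rfl⟩ := h
    · exact ⟨x, y, 0, 1, Or.inl rfl, hI, rfl⟩
    · exact ⟨x, y, -1, 1, Or.inr (Or.inr (Or.inr rfl)), hI, rfl⟩
    · exact ⟨x, y, 1, 0, Or.inr (Or.inl rfl), hI, rfl⟩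
    · exact ⟨x, y, 1, 1, Or.inr (Or.inr (Or.inl rfl)), hI, rfl⟩
  · rintro ⟨x, y, dx, dy, hd, hI, rfl⟩
    rcases hd with h | h | h | h <;>
      (rw [Prod.ext_iff] at h; obtain ⟨h1, h2⟩ := h; dsimp at h1 h2; subst h1; subst h2)
    · exact Or.inl (Or.inl (Or.inl ⟨x, y, hI, rfl⟩))
    · exact Or.inl (Or.inr ⟨x, y, hI, rfl⟩)
    · exact Or.inr ⟨x, y, hI, rfl⟩
    · exact Or.inl (Or.inl (Or.inr ⟨x, y, hI, rfl⟩))
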